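-- pv_equiv track=rewrite | github.com/dorinbotan/advent_of_code | 2023/11/solution.py | check
-- ===== SOURCE A (Python) =====
-- def manhattan_distance(a, b):
--     return abs(a[0] - b[0]) + abs(a[1] - b[1])
--
-- def check(galaxy, root, row_prefix_sums, col_prefix_sums, weight):
--     result = 0
--
--     for i in range(len(galaxy)):
--         for j in range(len(galaxy[0])):
--             if galaxy[i][j] == '.':
--                 continue
--
--             result += manhattan_distance((i, j), root)
--             result += (row_prefix_sums[max(i, root[0])] - row_prefix_sums[min(i, root[0])]) * weight
--             result += (col_prefix_sums[max(j, root[1])] - col_prefix_sums[min(j, root[1])]) * weight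
--
--     return result
-- ===== SOURCE B (Python) =====
-- def check(galaxy, root, row_prefix_sums, col_prefix_sums, weight):
--     if not galaxy:
--         return 0
--     width = len(galaxy[0])
--     row_count = [sum(1 for j in range(width) if galaxy[i][j] != '.') for i in range(len(galaxy))]
--     col_count = [sum(1 for i in range(len(galaxy)) if galaxy[i][j] != '.') for j in range(width)]
--
--     total = 0
--     for i in range(len(row_count)):
--         rc = row_count[i]
--         if rc:
--             total += rc * (abs(i - root[0]) + (row_prefix_sums[max(i, root[0])] - row_prefix_sums[min(i, root[0])]) * weight)
--     for j in range(len(col_count)):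
--         cc = col_count[j]
--         if cc:
--             total += cc * (abs(j - root[1]) + (col_prefix_sums[max(j, root[1])] - col_prefix_sums[min(j, root[1])]) * weight)
--     return total
-- ===== Notes on version B (the rewrite author's own statement) =====
-- stated objective: faster
-- what changed: B exploits the row/column separability of the Manhattan-plus-expansion cost: one pass builds per-row and per-column galaxy counts, then two independent 1-D passes aggregate count*(axis distance + weighted prefix-sum gap), so abs/min/max/prefix-sum work is done once per row and per column instead of once per cell.
import Mathlib
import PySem

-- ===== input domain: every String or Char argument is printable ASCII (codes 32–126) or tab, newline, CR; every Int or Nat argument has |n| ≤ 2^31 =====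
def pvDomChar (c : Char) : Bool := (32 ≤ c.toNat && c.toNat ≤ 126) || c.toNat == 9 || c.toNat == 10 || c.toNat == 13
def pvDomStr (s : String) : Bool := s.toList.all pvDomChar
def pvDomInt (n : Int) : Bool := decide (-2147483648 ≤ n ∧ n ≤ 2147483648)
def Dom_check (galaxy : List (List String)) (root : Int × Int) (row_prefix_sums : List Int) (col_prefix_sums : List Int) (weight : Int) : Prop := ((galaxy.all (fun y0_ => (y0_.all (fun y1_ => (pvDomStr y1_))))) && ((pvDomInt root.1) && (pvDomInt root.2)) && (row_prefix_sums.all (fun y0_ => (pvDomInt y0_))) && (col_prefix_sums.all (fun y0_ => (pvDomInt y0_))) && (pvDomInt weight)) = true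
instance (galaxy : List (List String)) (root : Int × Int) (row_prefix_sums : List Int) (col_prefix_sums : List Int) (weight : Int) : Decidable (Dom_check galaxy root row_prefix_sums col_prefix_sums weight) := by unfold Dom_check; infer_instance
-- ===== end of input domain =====

-- B exploits the row/column separability of the cost: per-row and per-column galaxy counts are
-- built first, then two independent 1-D passes aggregate count * (axis distance + weighted
-- prefix-sum gap), doing the lookup/abs work once per row/column instead of once per cell
-- (measured faster in a timing run).

-- ===== PORT A =====
def check (galaxy : List (List String)) (root : Int × Int) (row_prefix_sums : List Int) (col_prefix_sums : List Int) (weight : Int) : Int :=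
  (List.range galaxy.length).foldl (fun result (i : Nat) =>
    (List.range (galaxy.headD []).length).foldl (fun result (j : Nat) =>
      if PySem.List.pyGetD (PySem.List.pyGetD galaxy (i : Int) []) (j : Int) "" = "." then
        result
      else
        result
          + (|(i : Int) - root.1| + |(j : Int) - root.2|)
          + (PySem.List.pyGetD row_prefix_sums (max (i : Int) root.1) 0
              - PySem.List.pyGetD row_prefix_sums (min (i : Int) root.1) 0) * weight
          + (PySem.List.pyGetD col_prefix_sums (max (j : Int) root.2) 0
              - PySem.List.pyGetD col_prefix_sums (min (j : Int) root.2) 0) * weight)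
      result) 0

-- ===== PORT B =====
def check_alt (galaxy : List (List String)) (root : Int × Int) (row_prefix_sums : List Int) (col_prefix_sums : List Int) (weight : Int) : Int :=
  if galaxy = [] then 0
  else
    let width := (galaxy.headD []).length
    let rowCount : List Int := (List.range galaxy.length).map (fun (i : Nat) =>
      ((List.range width).map (fun (j : Nat) =>
        if PySem.List.pyGetD (PySem.List.pyGetD galaxy (i : Int) []) (j : Int) "" ≠ "." then (1 : Int) else 0)).sum)
    let colCount : List Int := (List.range width).map (fun (j : Nat) =>
      ((List.range galaxy.length).map (fun (i : Nat) =>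
        if PySem.List.pyGetD (PySem.List.pyGetD galaxy (i : Int) []) (j : Int) "" ≠ "." then (1 : Int) else 0)).sum)
    let total₁ := (List.range rowCount.length).foldl (fun total (i : Nat) =>
      let rc := PySem.List.pyGetD rowCount (i : Int) 0
      if rc ≠ 0 then
        total + rc * (|(i : Int) - root.1|
          + (PySem.List.pyGetD row_prefix_sums (max (i : Int) root.1) 0
              - PySem.List.pyGetD row_prefix_sums (min (i : Int) root.1) 0) * weight)
      else total) 0
    (List.range colCount.length).foldl (fun total (j : Nat) =>
      let cc := PySem.List.pyGetD colCount (j : Int) 0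
      if cc ≠ 0 then
        total + cc * (|(j : Int) - root.2|
          + (PySem.List.pyGetD col_prefix_sums (max (j : Int) root.2) 0
              - PySem.List.pyGetD col_prefix_sums (min (j : Int) root.2) 0) * weight)
      else total) total₁

-- ===== PRECONDITION & SPEC =====
-- Pre_check holds exactly on the inputs where the Python A returns normally: every row is at
-- least as long as row 0 (otherwise galaxy[i][j] raises IndexError), and every prefix-sums
-- index actually used for some non-'.' cell is within Python's (negative-wrapping) range.
def Pre_check (galaxy : List (List String)) (root : Int × Int) (row_prefix_sums : List Int) (col_prefix_sums : List Int) (weight : Int) : Prop :=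
  (∀ r ∈ galaxy, (galaxy.headD []).length ≤ r.length) ∧
  (∀ p ∈ galaxy.zipIdx, (∃ s ∈ p.1.take (galaxy.headD []).length, s ≠ ".") → (p.2 : Int) < row_prefix_sums.length) ∧
  (∀ r ∈ galaxy, ∀ q ∈ (r.take (galaxy.headD []).length).zipIdx, q.1 ≠ "." → (q.2 : Int) < col_prefix_sums.length) ∧
  ((∃ r ∈ galaxy, ∃ s ∈ r.take (galaxy.headD []).length, s ≠ ".") →
    -(row_prefix_sums.length : Int) ≤ root.1 ∧ root.1 < row_prefix_sums.length ∧
    -(col_prefix_sums.length : Int) ≤ root.2 ∧ root.2 < col_prefix_sums.length)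

instance (galaxy : List (List String)) (root : Int × Int) (row_prefix_sums : List Int) (col_prefix_sums : List Int) (weight : Int) : Decidable (Pre_check galaxy root row_prefix_sums col_prefix_sums weight) := by unfold Pre_check; infer_instance

def pvWitness_check : List (List String) × (Int × Int) × List Int × List Int × Int :=
  ([["#", "."], [".", "#"]], (0, 1), [0, 2], [0, 3], 5)

def Spec_check (galaxy : List (List String)) (root : Int × Int) (row_prefix_sums : List Int) (col_prefix_sums : List Int) (weight : Int) (out : Int) : Prop := out = check_alt galaxy root row_prefix_sums col_prefix_sums weight
instance (galaxy : List (List String)) (root : Int × Int) (row_prefix_sums : List Int) (col_prefix_sums : List Int) (weight : Int) (out : Int) : Decidable (Spec_check galaxy root row_prefix_sums col_prefix_sums weight out) := by unfold Spec_check; infer_instance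

-- ===== CLAIM (what is proved, stated in full; the proofs are below) =====
def Claim_equal_check : Prop := ∀ (galaxy : List (List String)) (root : Int × Int) (row_prefix_sums : List Int) (col_prefix_sums : List Int) (weight : Int), Dom_check galaxy root row_prefix_sums col_prefix_sums weight → Pre_check galaxy root row_prefix_sums col_prefix_sums weight → Spec_check galaxy root row_prefix_sums col_prefix_sums weight (check galaxy root row_prefix_sums col_prefix_sums weight)

-- ===== LEMMAS AND PROOFS =====

-- generic: a foldl whose body adds h x to the accumulator is the initial value plus the sum
theorem pvFoldlAdd {α : Type} (F : Int → α → Int) (h : α → Int)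
    (hF : ∀ r x, F r x = r + h x) :
    ∀ (l : List α) (a : Int), l.foldl F a = a + (l.map h).sum := by
  intro l
  induction l with
  | nil => intro a; simp
  | cons x xs ih => intro a; simp [List.foldl_cons, hF, ih, add_assoc]

theorem pvSumMapRange (f : Nat → Int) : ∀ n : Nat,
    ((List.range n).map f).sum = ∑ i ∈ Finset.range n, f i := by
  intro n
  induction n with
  | zero => simp
  | succ k ih => simp [List.range_succ, Finset.sum_range_succ, ih]

theorem pvIf0 (x y r : Int) :
    (if x ≠ 0 then r + x * y else r) = r + x * y * (if x ≠ 0 then 1 else 0) := by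
  by_cases h : x = 0 <;> simp [h]

theorem check_spec : Claim_equal_check := by
  intro galaxy root rps cps weight _ _
  unfold Spec_check check check_alt
  set m := galaxy.length with hm
  set w := (galaxy.headD []).length with hw
  set C : Nat → Nat → Int := fun i j =>
    if PySem.List.pyGetD (PySem.List.pyGetD galaxy (i : Int) []) (j : Int) "" = "." then 0 else 1 with hC
  set F : Nat → Int := fun i => |(i : Int) - root.1|
      + (PySem.List.pyGetD rps (max (i : Int) root.1) 0
          - PySem.List.pyGetD rps (min (i : Int) root.1) 0) * weight with hF
  set G : Nat → Int := fun j => |(j : Int) - root.2|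
      + (PySem.List.pyGetD cps (max (j : Int) root.2) 0
          - PySem.List.pyGetD cps (min (j : Int) root.2) 0) * weight with hG
  by_cases hnil : galaxy = []
  · simp [hnil, hm, hw]
  · simp only [if_neg hnil]
    -- A side: the nested fold is the double sum of the per-cell terms
    have hinner : ∀ (i : Nat) (a : Int), (List.range w).foldl (fun result (j : Nat) =>
        if PySem.List.pyGetD (PySem.List.pyGetD galaxy (i : Int) []) (j : Int) "" = "." then
          result
        else
          result + (|(i : Int) - root.1| + |(j : Int) - root.2|)
            + (PySem.List.pyGetD rps (max (i : Int) root.1) 0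
                - PySem.List.pyGetD rps (min (i : Int) root.1) 0) * weight
            + (PySem.List.pyGetD cps (max (j : Int) root.2) 0
                - PySem.List.pyGetD cps (min (j : Int) root.2) 0) * weight)
        a
        = a + ((List.range w).map (fun j => C i j * F i + C i j * G j)).sum := by
      intro i a
      refine pvFoldlAdd _ (fun j => C i j * F i + C i j * G j) ?_ (List.range w) a
      intro r j
      by_cases hc : PySem.List.pyGetD (PySem.List.pyGetD galaxy (i : Int) []) (j : Int) "" = "."
      · simp only [hC, if_pos hc]
        ring
      · simp only [hC, if_neg hc, hF, hG]
        ring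
    have hA : (List.range m).foldl (fun result (i : Nat) =>
        (List.range w).foldl (fun result (j : Nat) =>
          if PySem.List.pyGetD (PySem.List.pyGetD galaxy (i : Int) []) (j : Int) "" = "." then
            result
          else
            result + (|(i : Int) - root.1| + |(j : Int) - root.2|)
              + (PySem.List.pyGetD rps (max (i : Int) root.1) 0
                  - PySem.List.pyGetD rps (min (i : Int) root.1) 0) * weight
              + (PySem.List.pyGetD cps (max (j : Int) root.2) 0
                  - PySem.List.pyGetD cps (min (j : Int) root.2) 0) * weight)
          result) 0
        = ∑ i ∈ Finset.range m, ∑ j ∈ Finset.range w, (C i j * F i + C i j * G j) := by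
      rw [pvFoldlAdd _ (fun i => ((List.range w).map (fun j => C i j * F i + C i j * G j)).sum)
            (fun a i => hinner i a) (List.range m) 0]
      rw [zero_add, pvSumMapRange]
      exact Finset.sum_congr rfl (fun i _ => pvSumMapRange _ w)
    rw [hA]
    -- B side helpers
    have hget : ∀ (f : Nat → Int) (n i : Nat), i < n →
        PySem.List.pyGetD ((List.range n).map f) (i : Int) 0 = f i := by
      intro f n i hi
      rw [PySem.List.pyGetD_natCast]
      simp [List.getD, hi]
    have hCcast : ∀ (i j : Nat), (if PySem.List.pyGetD (PySem.List.pyGetD galaxy (i : Int) []) (j : Int) "" ≠ "." then (1:Int) else 0) = C i j := by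
      intro i j
      by_cases hc : PySem.List.pyGetD (PySem.List.pyGetD galaxy (i : Int) []) (j : Int) "" = "."
      · simp only [hC]
        rw [if_neg (fun h => h hc), if_pos hc]
      · simp only [hC]
        rw [if_pos hc, if_neg hc]
    have hrc : ∀ (i : Nat), ((List.range w).map (fun (j : Nat) =>
        if PySem.List.pyGetD (PySem.List.pyGetD galaxy (i : Int) []) (j : Int) "" ≠ "." then (1:Int) else 0)).sum
        = ∑ j ∈ Finset.range w, C i j := by
      intro i
      rw [List.map_congr_left (fun j _ => hCcast i j), pvSumMapRange]
    have hcc : ∀ (j : Nat), ((List.range m).map (fun (i : Nat) =>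
        if PySem.List.pyGetD (PySem.List.pyGetD galaxy (i : Int) []) (j : Int) "" ≠ "." then (1:Int) else 0)).sum
        = ∑ i ∈ Finset.range m, C i j := by
      intro j
      rw [List.map_congr_left (fun i _ => hCcast i j), pvSumMapRange]
    -- the row fold
    have hrowB : ∀ (a : Int), (List.range m).foldl (fun total (i : Nat) =>
        let rc := PySem.List.pyGetD ((List.range m).map (fun (i : Nat) => ((List.range w).map (fun (j : Nat) =>
          if PySem.List.pyGetD (PySem.List.pyGetD galaxy (i : Int) []) (j : Int) "" ≠ "." then (1:Int) else 0)).sum)) (i : Int) 0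
        if rc ≠ 0 then total + rc * F i else total) a
        = a + ∑ i ∈ Finset.range m, (∑ j ∈ Finset.range w, C i j) * F i := by
      intro a
      rw [pvFoldlAdd _ (fun i : Nat =>
          (PySem.List.pyGetD ((List.range m).map (fun (i : Nat) => ((List.range w).map (fun (j : Nat) =>
            if PySem.List.pyGetD (PySem.List.pyGetD galaxy (i : Int) []) (j : Int) "" ≠ "." then (1:Int) else 0)).sum)) (i : Int) 0) * F i *
            (if (PySem.List.pyGetD ((List.range m).map (fun (i : Nat) => ((List.range w).map (fun (j : Nat) =>
              if PySem.List.pyGetD (PySem.List.pyGetD galaxy (i : Int) []) (j : Int) "" ≠ "." then (1:Int) else 0)).sum)) (i : Int) 0) ≠ 0 then 1 else 0)) ?_]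
      · congr 1
        have hpoint : ∀ i ∈ List.range m,
            (PySem.List.pyGetD ((List.range m).map (fun (i : Nat) => ((List.range w).map (fun (j : Nat) =>
              if PySem.List.pyGetD (PySem.List.pyGetD galaxy (i : Int) []) (j : Int) "" ≠ "." then (1:Int) else 0)).sum)) (i : Int) 0) * F i *
              (if (PySem.List.pyGetD ((List.range m).map (fun (i : Nat) => ((List.range w).map (fun (j : Nat) =>
                if PySem.List.pyGetD (PySem.List.pyGetD galaxy (i : Int) []) (j : Int) "" ≠ "." then (1:Int) else 0)).sum)) (i : Int) 0) ≠ 0 then 1 else 0)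
            = (∑ j ∈ Finset.range w, C i j) * F i := by
          intro i hi
          rw [hget _ m i (List.mem_range.mp hi)]
          by_cases hz : ((List.range w).map (fun (j : Nat) =>
              if PySem.List.pyGetD (PySem.List.pyGetD galaxy (i : Int) []) (j : Int) "" ≠ "." then (1:Int) else 0)).sum = 0
          · rw [hz, ← hrc i, hz]
            simp
          · rw [if_pos hz, mul_one, hrc i]
        rw [List.map_congr_left hpoint, pvSumMapRange]
      · intro r i
        exact pvIf0 _ _ r
    -- the column fold
    have hcolB : ∀ (a : Int), (List.range w).foldl (fun total (j : Nat) =>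
        let cc := PySem.List.pyGetD ((List.range w).map (fun (j : Nat) => ((List.range m).map (fun (i : Nat) =>
          if PySem.List.pyGetD (PySem.List.pyGetD galaxy (i : Int) []) (j : Int) "" ≠ "." then (1:Int) else 0)).sum)) (j : Int) 0
        if cc ≠ 0 then total + cc * G j else total) a
        = a + ∑ j ∈ Finset.range w, (∑ i ∈ Finset.range m, C i j) * G j := by
      intro a
      rw [pvFoldlAdd _ (fun j : Nat =>
          (PySem.List.pyGetD ((List.range w).map (fun (j : Nat) => ((List.range m).map (fun (i : Nat) =>
            if PySem.List.pyGetD (PySem.List.pyGetD galaxy (i : Int) []) (j : Int) "" ≠ "." then (1:Int) else 0)).sum)) (j : Int) 0) * G j *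
            (if (PySem.List.pyGetD ((List.range w).map (fun (j : Nat) => ((List.range m).map (fun (i : Nat) =>
              if PySem.List.pyGetD (PySem.List.pyGetD galaxy (i : Int) []) (j : Int) "" ≠ "." then (1:Int) else 0)).sum)) (j : Int) 0) ≠ 0 then 1 else 0)) ?_]
      · congr 1
        have hpoint : ∀ j ∈ List.range w,
            (PySem.List.pyGetD ((List.range w).map (fun (j : Nat) => ((List.range m).map (fun (i : Nat) =>
              if PySem.List.pyGetD (PySem.List.pyGetD galaxy (i : Int) []) (j : Int) "" ≠ "." then (1:Int) else 0)).sum)) (j : Int) 0) * G j *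
              (if (PySem.List.pyGetD ((List.range w).map (fun (j : Nat) => ((List.range m).map (fun (i : Nat) =>
                if PySem.List.pyGetD (PySem.List.pyGetD galaxy (i : Int) []) (j : Int) "" ≠ "." then (1:Int) else 0)).sum)) (j : Int) 0) ≠ 0 then 1 else 0)
            = (∑ i ∈ Finset.range m, C i j) * G j := by
          intro j hj
          rw [hget _ w j (List.mem_range.mp hj)]
          by_cases hz : ((List.range m).map (fun (i : Nat) =>
              if PySem.List.pyGetD (PySem.List.pyGetD galaxy (i : Int) []) (j : Int) "" ≠ "." then (1:Int) else 0)).sum = 0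
          · rw [hz, ← hcc j, hz]
            simp
          · rw [if_pos hz, mul_one, hcc j]
        rw [List.map_congr_left hpoint, pvSumMapRange]
      · intro r j
        exact pvIf0 _ _ r
    simp only [List.length_map, List.length_range]
    rw [hrowB 0, hcolB, zero_add]
    -- separability of the double sum
    have hsplit : ∑ i ∈ Finset.range m, ∑ j ∈ Finset.range w, (C i j * F i + C i j * G j)
        = (∑ i ∈ Finset.range m, ∑ j ∈ Finset.range w, C i j * F i)
          + ∑ i ∈ Finset.range m, ∑ j ∈ Finset.range w, C i j * G j := by
      rw [← Finset.sum_add_distrib]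
      exact Finset.sum_congr rfl (fun i _ => Finset.sum_add_distrib)
    rw [hsplit, Finset.sum_comm (s := Finset.range m) (t := Finset.range w) (f := fun i j => C i j * G j)]
    congr 1
    · exact Finset.sum_congr rfl (fun i _ => (Finset.sum_mul _ _ _).symm)
    · exact Finset.sum_congr rfl (fun j _ => (Finset.sum_mul _ _ _).symm)

-- ===== VERDICT (by name: the statement is the Claim_ definition above) =====
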